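-- pv_equiv track=rewrite | github.com/cebrametamex/cebrameta | backend/app/services/pipeline.py | _edges_to_rectangles
-- ===== SOURCE A (Python) =====
-- from typing import BinaryIO, Dict, Iterable, List, Sequence, Tuple
--
-- def _edges_to_rectangles(edges: List[List[bool]]) -> Tuple[List[Tuple[int, int, int, int]], int, int]:
--     height = len(edges)
--     width = len(edges[0]) if height else 0
--     rectangles: List[Tuple[int, int, int, int]] = []
--
--     for y in range(height):
--         start = None
--         for x in range(width):
--             if edges[y][x]:
--                 if start is None:
--                     start = x
--             elif start is not None:
--                 length = x - start
--                 if length > 0: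
--                     rectangles.append((start, y, length, 1))
--                 start = None
--         if start is not None:
--             length = width - start
--             if length > 0:
--                 rectangles.append((start, y, length, 1))
--     return rectangles, width, height
-- ===== SOURCE B (Python) =====
-- from typing import List, Tuple
--
--
-- def _edges_to_rectangles(edges: List[List[bool]]) -> Tuple[List[Tuple[int, int, int, int]], int, int]:
--     height = len(edges)
--     width = len(edges[0]) if height else 0
--     rectangles: List[Tuple[int, int, int, int]] = []
--     for y in range(height):
--         row = edges[y]
--         # boundary detection: a run starts where a True cell has no True on its left,
--         # and ends where a True cell has no True on its right (within the first `width` cells)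
--         starts = [x for x in range(width) if row[x] and not (x > 0 and row[x - 1])]
--         ends = [x for x in range(width) if row[x] and not (x + 1 < width and row[x + 1])]
--         for s, e in zip(starts, ends):
--             rectangles.append((s, y, e - s + 1, 1))
--     return rectangles, width, height
-- ===== Notes on version B (the rewrite author's own statement) =====
-- stated objective: alternative
-- what changed: Replaces A's stateful run-tracking scan (pending `start` variable plus end-of-row flush) with stateless boundary detection: per row, compute the list of run starts (True with no True to the left) and the list of run ends (True with no True to the right) as two independent filters and zip them into rectangles.
import Mathlib
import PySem

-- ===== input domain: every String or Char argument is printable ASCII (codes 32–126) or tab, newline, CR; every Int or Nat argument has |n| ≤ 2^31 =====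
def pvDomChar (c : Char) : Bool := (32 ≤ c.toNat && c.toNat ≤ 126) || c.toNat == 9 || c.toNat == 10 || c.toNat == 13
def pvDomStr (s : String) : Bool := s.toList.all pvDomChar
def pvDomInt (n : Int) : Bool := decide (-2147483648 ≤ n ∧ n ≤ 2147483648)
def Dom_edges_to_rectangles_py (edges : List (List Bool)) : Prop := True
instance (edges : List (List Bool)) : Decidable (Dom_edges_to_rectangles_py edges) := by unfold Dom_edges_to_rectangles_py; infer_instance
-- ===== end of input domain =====

-- B replaces A's stateful run scan by stateless boundary detection: per row it filters
-- run starts (True, no True left) and run ends (True, no True right) and zips them.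

-- ===== PORT A =====
-- one step of A's inner x-loop: b is the cell value edges[y][x]
def pvStepA (y : Int) (st : List (Int × Int × Int × Int) × Option Int) (x : Int) (b : Bool) :
    List (Int × Int × Int × Int) × Option Int :=
  if b then
    match st.2 with
    | none => (st.1, some x)
    | some s => (st.1, some s)
  else
    match st.2 with
    | some s =>
      let length := x - s
      ((if length > 0 then st.1 ++ [(s, y, length, 1)] else st.1), none)
    | none => (st.1, none)

-- A's trailing 'if start is not None' flush after the inner loop
def pvFlushA (y width : Int) (st : List (Int × Int × Int × Int) × Option Int) :
    List (Int × Int × Int × Int) :=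
  match st.2 with
  | some s =>
    let length := width - s
    if length > 0 then st.1 ++ [(s, y, length, 1)] else st.1
  | none => st.1

-- port of A, the given Python
def edges_to_rectangles_py (edges : List (List Bool)) : (List (Int × Int × Int × Int)) × Int × Int :=
  let height : Int := edges.length
  let width : Int := if edges.length ≠ 0 then ((PySem.List.pyGetD edges 0 []).length : Int) else 0
  let rectangles : List (Int × Int × Int × Int) :=
    (PySem.List.pyRange 0 height 1).foldl
      (fun rectangles y =>
        pvFlushA y width
          ((PySem.List.pyRange 0 width 1).foldl
            (fun st x => pvStepA y st x (PySem.List.pyGetD (PySem.List.pyGetD edges y []) x false))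
            (rectangles, none)))
      []
  (rectangles, width, height)

-- ===== PORT B =====
-- port of YOUR implementation B: per row, two boundary filters and a zip
def edges_to_rectangles_py_alt (edges : List (List Bool)) : (List (Int × Int × Int × Int)) × Int × Int :=
  let height : Int := edges.length
  let width : Int := if edges.length ≠ 0 then ((PySem.List.pyGetD edges 0 []).length : Int) else 0
  let rectangles : List (Int × Int × Int × Int) :=
    (PySem.List.pyRange 0 height 1).foldl
      (fun rects y =>
        let row := PySem.List.pyGetD edges y []
        let starts := (PySem.List.pyRange 0 width 1).filter
          (fun x => PySem.List.pyGetD row x false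
            && !(decide (x > 0) && PySem.List.pyGetD row (x - 1) false))
        let ends := (PySem.List.pyRange 0 width 1).filter
          (fun x => PySem.List.pyGetD row x false
            && !(decide (x + 1 < width) && PySem.List.pyGetD row (x + 1) false))
        (starts.zip ends).foldl
          (fun rects p => rects ++ [(p.1, y, p.2 - p.1 + 1, 1)]) rects)
      []
  (rectangles, width, height)

-- ===== PRECONDITION & SPEC =====
-- Pre_ excludes exactly the grids with a row shorter than the first row, on which A's
-- edges[y][x] raises IndexError.
def Pre_edges_to_rectangles_py (edges : List (List Bool)) : Prop :=
  ∀ row ∈ edges, (match edges with | [] => 0 | r :: _ => r.length) ≤ row.length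
instance (edges : List (List Bool)) : Decidable (Pre_edges_to_rectangles_py edges) := by
  unfold Pre_edges_to_rectangles_py; infer_instance

def pvWitness_edges_to_rectangles_py : List (List Bool) := [[true, false, true], [true, true, false]]

def Spec_edges_to_rectangles_py (edges : List (List Bool)) (out : (List (Int × Int × Int × Int)) × Int × Int) : Prop := out = edges_to_rectangles_py_alt edges
instance (edges : List (List Bool)) (out : (List (Int × Int × Int × Int)) × Int × Int) : Decidable (Spec_edges_to_rectangles_py edges out) := by unfold Spec_edges_to_rectangles_py; infer_instance

-- ===== CLAIM (what is proved, stated in full; the proofs are below) =====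
def Claim_equal_edges_to_rectangles_py : Prop := ∀ (edges : List (List Bool)), Dom_edges_to_rectangles_py edges → Pre_edges_to_rectangles_py edges → Spec_edges_to_rectangles_py edges (edges_to_rectangles_py edges)

-- ===== LEMMAS AND PROOFS =====

-- reference spec: the maximal-true-run rectangles of row l at row index y, starting at offset x
def pvRuns (y : Int) : List Bool → Int → List (Int × Int × Int × Int)
  | [], _ => []
  | b :: t, x =>
    if b then
      (x, y, ((t.takeWhile (· == b)).length : Int) + 1, 1)
        :: pvRuns y (t.dropWhile (· == b)) (x + ((t.takeWhile (· == b)).length : Int) + 1)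
    else pvRuns y (t.dropWhile (· == b)) (x + ((t.takeWhile (· == b)).length : Int) + 1)
termination_by l => l.length
decreasing_by
  all_goals simp only [List.length_cons]
  all_goals exact Nat.lt_succ_of_le (List.length_dropWhile_le _ _)

theorem pvRuns_nil (y x : Int) : pvRuns y [] x = [] := by simp [pvRuns]

theorem pvRuns_cons (y x : Int) (b : Bool) (t : List Bool) :
    pvRuns y (b :: t) x =
      if b then
        (x, y, ((t.takeWhile (· == b)).length : Int) + 1, 1)
          :: pvRuns y (t.dropWhile (· == b)) (x + ((t.takeWhile (· == b)).length : Int) + 1)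
      else pvRuns y (t.dropWhile (· == b)) (x + ((t.takeWhile (· == b)).length : Int) + 1) := by
  rw [pvRuns.eq_def]

theorem pvRuns_true_cons (y x : Int) (t : List Bool) :
    pvRuns y (true :: t) x =
      (x, y, ((t.takeWhile (· == true)).length : Int) + 1, 1)
        :: pvRuns y (t.dropWhile (· == true)) (x + ((t.takeWhile (· == true)).length : Int) + 1) := by
  rw [pvRuns_cons]; simp

theorem pvRuns_false_cons (y x : Int) (t : List Bool) :
    pvRuns y (false :: t) x =
      pvRuns y (t.dropWhile (· == false)) (x + ((t.takeWhile (· == false)).length : Int) + 1) := by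
  rw [pvRuns_cons]; simp

theorem pvRuns_false (y x : Int) (t : List Bool) :
    pvRuns y (false :: t) x = pvRuns y t (x + 1) := by
  cases t with
  | nil => simp [pvRuns_false_cons, pvRuns_nil]
  | cons b t' =>
    cases b with
    | false =>
      rw [pvRuns_false_cons, pvRuns_false_cons]
      simp only [List.takeWhile_cons, List.dropWhile_cons, beq_self_eq_true, if_true,
        List.length_cons]
      congr 1
      push_cast
      ring
    | true =>
      rw [pvRuns_false_cons]
      simp

-- step lemmas for A's state machine (all definitional)
theorem pvStepA_true_none (y x : Int) (rects : List (Int × Int × Int × Int)) :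
    pvStepA y (rects, none) x true = (rects, some x) := rfl
theorem pvStepA_true_some (y x s : Int) (rects : List (Int × Int × Int × Int)) :
    pvStepA y (rects, some s) x true = (rects, some s) := rfl
theorem pvStepA_false_none (y x : Int) (rects : List (Int × Int × Int × Int)) :
    pvStepA y (rects, none) x false = (rects, none) := rfl
theorem pvStepA_false_some (y x s : Int) (rects : List (Int × Int × Int × Int)) :
    pvStepA y (rects, some s) x false
      = ((if x - s > 0 then rects ++ [(s, y, x - s, 1)] else rects), none) := rfl

-- an index-carrying fold, used to restate all the index-driven loops
def pvIdxFold {α σ : Type} (g : σ → Int → α → σ) : List α → Int → σ → σ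
  | [], _, st => st
  | a :: t, x, st => pvIdxFold g t (x + 1) (g st x a)

theorem pvIdxFold_nil {α σ : Type} (g : σ → Int → α → σ) (x : Int) (st : σ) :
    pvIdxFold g [] x st = st := rfl
theorem pvIdxFold_cons {α σ : Type} (g : σ → Int → α → σ) (a : α) (t : List α) (x : Int) (st : σ) :
    pvIdxFold g (a :: t) x st = pvIdxFold g t (x + 1) (g st x a) := rfl

-- a foldl over range(k, w) reading xs[i] is an index-carrying fold over the list prefix
theorem pvBridge {α σ : Type} (xs : List α) (d : α) (g : σ → Int → α → σ) (w : ℕ)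
    (hw : w ≤ xs.length) :
    ∀ (n k : ℕ) (st : σ), k ≤ w → w - k = n →
      (PySem.List.pyRange (k : Int) (w : Int) 1).foldl
          (fun st i => g st i (PySem.List.pyGetD xs i d)) st
        = pvIdxFold g ((xs.take w).drop k) (k : Int) st := by
  intro n
  induction n with
  | zero =>
    intro k st hk hn
    have hkw : k = w := by omega
    subst hkw
    rw [PySem.List.pyRange_one_eq_nil (le_refl _)]
    rw [List.drop_eq_nil_of_le (by simp [Nat.min_eq_left hw])]
    rfl
  | succ m ih =>
    intro k st hk hn
    have hklt : k < w := by omega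
    have hkx : k < xs.length := lt_of_lt_of_le hklt hw
    rw [PySem.List.pyRange_one_cons (by exact_mod_cast hklt)]
    simp only [List.foldl_cons]
    have hlen : k < (xs.take w).length := by simp [Nat.min_eq_left hw]; omega
    rw [List.drop_eq_getElem_cons hlen]
    rw [pvIdxFold_cons]
    have h1 : ((k : Int) + 1) = ((k + 1 : ℕ) : Int) := by push_cast; ring
    rw [h1, ih (k + 1) _ (by omega) (by omega)]
    congr 2
    · rw [PySem.List.pyGetD_natCast, List.getD_eq_getElem xs d hkx, List.getElem_take]

-- A's inner loop plus flush computes the run rectangles (the some-state clause is the invariant)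
theorem pvMainA (y : Int) :
    ∀ (l : List Bool) (x : Int) (rects : List (Int × Int × Int × Int)),
      (pvFlushA y (x + l.length) (pvIdxFold (pvStepA y) l x (rects, none))
          = rects ++ pvRuns y l x)
      ∧ (∀ s : Int, s < x →
          pvFlushA y (x + l.length) (pvIdxFold (pvStepA y) l x (rects, some s))
            = rects ++ (s, y, x + ((l.takeWhile (· == true)).length : Int) - s, 1)
                :: pvRuns y (l.dropWhile (· == true)) (x + ((l.takeWhile (· == true)).length : Int))) := by
  intro l
  induction l with
  | nil =>
    intro x rects
    constructor
    · simp [pvIdxFold_nil, pvFlushA, pvRuns_nil]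
    · intro s hs
      simp only [pvIdxFold_nil, pvFlushA, List.length_nil, List.takeWhile_nil,
        List.dropWhile_nil, Nat.cast_zero, add_zero, pvRuns_nil]
      rw [if_pos (by omega)]
  | cons b t ih =>
    intro x rects
    have hlen : x + ((b :: t).length : Int) = x + 1 + (t.length : Int) := by
      simp only [List.length_cons]; push_cast; ring
    cases b with
    | true =>
      constructor
      · rw [pvIdxFold_cons, pvStepA_true_none, hlen]
        rw [(ih (x + 1) rects).2 x (by omega)]
        rw [pvRuns_true_cons]
        rw [List.append_right_inj]
        ring_nf
      · intro s hs
        rw [pvIdxFold_cons, pvStepA_true_some, hlen]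
        rw [(ih (x + 1) rects).2 s (by omega)]
        simp only [List.takeWhile_cons, List.dropWhile_cons, beq_self_eq_true, if_true,
          List.length_cons]
        rw [List.append_right_inj]
        push_cast
        ring_nf
    | false =>
      constructor
      · rw [pvIdxFold_cons, pvStepA_false_none, hlen]
        rw [(ih (x + 1) rects).1, pvRuns_false]
      · intro s hs
        rw [pvIdxFold_cons, pvStepA_false_some, hlen]
        rw [if_pos (by omega : x - s > 0)]
        rw [(ih (x + 1) (rects ++ [(s, y, x - s, 1)])).1]
        have h3 : ((false :: t).takeWhile (· == true)) = [] := by simp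
        have h4 : ((false :: t).dropWhile (· == true)) = false :: t := by simp
        rw [h3, h4, List.length_nil, Nat.cast_zero, add_zero, pvRuns_false]
        simp

-- ===== B-side reference functions: starts and ends of maximal true runs =====
-- pvStarts l p x : positions (from offset x) of true cells whose left neighbour (p for the
-- first cell) is false; pvEnds l x : positions of true cells whose right neighbour is false
def pvStarts : List Bool → Bool → Int → List Int
  | [], _, _ => []
  | b :: t, p, x => (if b && !p then [x] else []) ++ pvStarts t b (x + 1)

def pvEnds : List Bool → Int → List Int
  | [], _ => []
  | b :: t, x => (if b && !(t.headD false) then [x] else []) ++ pvEnds t (x + 1)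

theorem pvStarts_false_cons (t : List Bool) (p : Bool) (x : Int) :
    pvStarts (false :: t) p x = pvStarts t false (x + 1) := by simp [pvStarts]

theorem pvStarts_true_cons (t : List Bool) (x : Int) :
    pvStarts (true :: t) false x = x :: pvStarts t true (x + 1) := by simp [pvStarts]

theorem pvEnds_false_cons (t : List Bool) (x : Int) :
    pvEnds (false :: t) x = pvEnds t (x + 1) := by simp [pvEnds]

-- inside a true run no further start is emitted
theorem pvStarts_run :
    ∀ (t : List Bool) (x : Int),
      pvStarts t true x
        = pvStarts (t.dropWhile (· == true)) false (x + ((t.takeWhile (· == true)).length : Int)) := by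
  intro t
  induction t with
  | nil => intro x; simp [pvStarts]
  | cons b t' ih =>
    intro x
    cases b with
    | true =>
      have h1 : pvStarts (true :: t') true x = pvStarts t' true (x + 1) := by simp [pvStarts]
      rw [h1, ih]
      simp only [List.dropWhile_cons, List.takeWhile_cons, beq_self_eq_true, if_true,
        List.length_cons]
      congr 1
      push_cast
      ring
    | false =>
      simp only [List.dropWhile_cons, List.takeWhile_cons]
      norm_num [pvStarts_false_cons]

theorem pvEnds_true_cons :
    ∀ (t : List Bool) (x : Int),
      pvEnds (true :: t) x
        = (x + ((t.takeWhile (· == true)).length : Int))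
            :: pvEnds (t.dropWhile (· == true)) (x + ((t.takeWhile (· == true)).length : Int) + 1) := by
  intro t
  induction t with
  | nil => intro x; simp [pvEnds]
  | cons b t' ih =>
    intro x
    cases b with
    | true =>
      have h1 : pvEnds (true :: true :: t') x = pvEnds (true :: t') (x + 1) := by simp [pvEnds]
      rw [h1, ih]
      simp only [List.dropWhile_cons, List.takeWhile_cons, beq_self_eq_true, if_true,
        List.length_cons]
      have h2 : x + 1 + ((List.takeWhile (fun x => x == true) t').length : Int)
          = x + (((List.takeWhile (fun x => x == true) t').length + 1 : ℕ) : Int) := by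
        push_cast; ring
      rw [h2]
    | false =>
      have h1 : pvEnds (true :: false :: t') x = x :: pvEnds (false :: t') (x + 1) := by
        simp [pvEnds]
      rw [h1, pvEnds_false_cons]
      simp only [List.dropWhile_cons, List.takeWhile_cons]
      norm_num [pvEnds_false_cons]

theorem pvStarts_false_run :
    ∀ (t : List Bool) (x : Int),
      pvStarts (false :: t) false x
        = pvStarts (t.dropWhile (· == false)) false
            (x + ((t.takeWhile (· == false)).length : Int) + 1) := by
  intro t
  induction t with
  | nil => intro x; simp [pvStarts]
  | cons b t' ih =>
    intro x
    cases b with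
    | false =>
      rw [pvStarts_false_cons, show pvStarts (false :: t') false (x+1) = _ from ih (x+1)]
      simp only [List.dropWhile_cons, List.takeWhile_cons, beq_self_eq_true, if_true,
        List.length_cons]
      congr 1
      push_cast
      ring
    | true =>
      rw [pvStarts_false_cons]
      simp only [List.dropWhile_cons, List.takeWhile_cons]
      norm_num

theorem pvEnds_false_run :
    ∀ (t : List Bool) (x : Int),
      pvEnds (false :: t) x
        = pvEnds (t.dropWhile (· == false)) (x + ((t.takeWhile (· == false)).length : Int) + 1) := by
  intro t
  induction t with
  | nil => intro x; simp [pvEnds]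
  | cons b t' ih =>
    intro x
    cases b with
    | false =>
      rw [pvEnds_false_cons, show pvEnds (false :: t') (x+1) = _ from ih (x+1)]
      simp only [List.dropWhile_cons, List.takeWhile_cons, beq_self_eq_true, if_true,
        List.length_cons]
      congr 1
      push_cast
      ring
    | true =>
      rw [pvEnds_false_cons]
      simp only [List.dropWhile_cons, List.takeWhile_cons]
      norm_num

-- zipping starts with ends yields exactly the run rectangles
theorem pvZipRunsAux (y : Int) :
    ∀ (n : ℕ) (l : List Bool), l.length ≤ n → ∀ (x : Int),
      ((pvStarts l false x).zip (pvEnds l x)).map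
          (fun p => (p.1, y, p.2 - p.1 + 1, (1 : Int)))
        = pvRuns y l x := by
  intro n
  induction n with
  | zero =>
    intro l hl x
    have h0 : l = [] := List.eq_nil_of_length_eq_zero (by omega)
    subst h0
    simp [pvStarts, pvEnds, pvRuns_nil]
  | succ m ih =>
    intro l hl x
    cases l with
    | nil => simp [pvStarts, pvEnds, pvRuns_nil]
    | cons b t =>
      have ht : t.length ≤ m := by simp only [List.length_cons] at hl; omega
      cases b with
      | true =>
        rw [pvStarts_true_cons, pvStarts_run, pvEnds_true_cons, pvRuns_true_cons]
        simp only [List.zip_cons_cons, List.map_cons]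
        have h1 : x + (((t.takeWhile (· == true)).length : ℕ) : Int) - x + 1
            = (((t.takeWhile (· == true)).length : ℕ) : Int) + 1 := by ring
        rw [h1]
        have h2 : x + 1 + (((t.takeWhile (· == true)).length : ℕ) : Int)
            = x + (((t.takeWhile (· == true)).length : ℕ) : Int) + 1 := by ring
        rw [h2]
        rw [ih (t.dropWhile (· == true))
          (le_trans (List.length_dropWhile_le _ _) ht) _]
      | false =>
        rw [pvStarts_false_run, pvEnds_false_run, pvRuns_false_cons]
        exact ih (t.dropWhile (· == false))
          (le_trans (List.length_dropWhile_le _ _) ht) _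

theorem pvZipRuns (y : Int) (l : List Bool) (x : Int) :
    ((pvStarts l false x).zip (pvEnds l x)).map
        (fun p => (p.1, y, p.2 - p.1 + 1, (1 : Int)))
      = pvRuns y l x :=
  pvZipRunsAux y l.length l (le_refl _) x

-- B's append-fold over the zipped pairs
theorem pvFoldAppend (y : Int) :
    ∀ (l : List (Int × Int)) (rects : List (Int × Int × Int × Int)),
      l.foldl (fun rects p => rects ++ [(p.1, y, p.2 - p.1 + 1, 1)]) rects
        = rects ++ l.map (fun p => (p.1, y, p.2 - p.1 + 1, (1 : Int))) := by
  intro l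
  induction l with
  | nil => intro rects; simp
  | cons a t ih => intro rects; simp [ih]

-- the starts filter over range(0, w) is pvStarts of the row prefix
theorem pvStartsBridge (row : List Bool) (w : ℕ) (hw : w ≤ row.length) :
    ∀ (n k : ℕ), k ≤ w → w - k = n →
      (PySem.List.pyRange (k : Int) (w : Int) 1).filter
          (fun x => PySem.List.pyGetD row x false
            && !(decide (x > 0) && PySem.List.pyGetD row (x - 1) false))
        = pvStarts ((row.take w).drop k)
            (decide ((k : Int) > 0) && PySem.List.pyGetD row ((k : Int) - 1) false) (k : Int) := by
  intro n
  induction n with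
  | zero =>
    intro k hk hn
    have hkw : k = w := by omega
    subst hkw
    rw [PySem.List.pyRange_one_eq_nil (le_refl _)]
    rw [List.drop_eq_nil_of_le (by simp [Nat.min_eq_left hw])]
    simp [pvStarts]
  | succ m ih =>
    intro k hk hn
    have hklt : k < w := by omega
    have hkx : k < row.length := lt_of_lt_of_le hklt hw
    have hlen : k < (row.take w).length := by simp [Nat.min_eq_left hw]; omega
    rw [PySem.List.pyRange_one_cons (by exact_mod_cast hklt), List.filter_cons,
        List.drop_eq_getElem_cons hlen]
    have hk1 : ((k : Int) + 1) = ((k + 1 : ℕ) : Int) := by push_cast; ring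
    have hget : PySem.List.pyGetD row (k : Int) false = (row.take w)[k] := by
      rw [PySem.List.pyGetD_natCast, List.getD_eq_getElem row false hkx, List.getElem_take]
    have hprev : (decide (((k + 1 : ℕ) : Int) > 0)
          && PySem.List.pyGetD row (((k + 1 : ℕ) : Int) - 1) false) = (row.take w)[k] := by
      have he : (((k + 1 : ℕ) : Int) - 1) = ((k : ℕ) : Int) := by push_cast; ring
      rw [he, PySem.List.pyGetD_natCast, List.getD_eq_getElem row false hkx, List.getElem_take]
      have : decide (((k + 1 : ℕ) : Int) > 0) = true := by
        simp
      rw [this, Bool.true_and]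
    rw [hk1, ih (k + 1) (by omega) (by omega), hprev]
    show _ = pvStarts ((row.take w)[k] :: (row.take w).drop (k + 1)) _ (k : Int)
    rw [pvStarts]
    simp only [hget, hk1]
    by_cases hc : ((row.take w)[k]
        && !(decide ((k : Int) > 0) && PySem.List.pyGetD row ((k : Int) - 1) false)) = true
    · rw [if_pos hc, if_pos hc, List.singleton_append]
    · rw [if_neg hc, if_neg hc, List.nil_append]

-- the ends filter over range(0, w) is pvEnds of the row prefix
theorem pvEndsBridge (row : List Bool) (w : ℕ) (hw : w ≤ row.length) :
    ∀ (n k : ℕ), k ≤ w → w - k = n →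
      (PySem.List.pyRange (k : Int) (w : Int) 1).filter
          (fun x => PySem.List.pyGetD row x false
            && !(decide (x + 1 < (w : Int)) && PySem.List.pyGetD row (x + 1) false))
        = pvEnds ((row.take w).drop k) (k : Int) := by
  intro n
  induction n with
  | zero =>
    intro k hk hn
    have hkw : k = w := by omega
    subst hkw
    rw [PySem.List.pyRange_one_eq_nil (le_refl _)]
    rw [List.drop_eq_nil_of_le (by simp [Nat.min_eq_left hw])]
    simp [pvEnds]
  | succ m ih =>
    intro k hk hn
    have hklt : k < w := by omega
    have hkx : k < row.length := lt_of_lt_of_le hklt hw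
    have hlen : k < (row.take w).length := by simp [Nat.min_eq_left hw]; omega
    rw [PySem.List.pyRange_one_cons (by exact_mod_cast hklt), List.filter_cons,
        List.drop_eq_getElem_cons hlen]
    have hk1 : ((k : Int) + 1) = ((k + 1 : ℕ) : Int) := by push_cast; ring
    have hget : PySem.List.pyGetD row (k : Int) false = (row.take w)[k] := by
      rw [PySem.List.pyGetD_natCast, List.getD_eq_getElem row false hkx, List.getElem_take]
    have hnext : (decide ((k : Int) + 1 < (w : Int)) && PySem.List.pyGetD row ((k : Int) + 1) false)
        = ((row.take w).drop (k + 1)).headD false := by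
      by_cases hkw1 : k + 1 < w
      · have hk1x : k + 1 < row.length := lt_of_lt_of_le hkw1 hw
        have hlen1 : k + 1 < (row.take w).length := by simp [Nat.min_eq_left hw]; omega
        rw [List.drop_eq_getElem_cons hlen1, List.headD_cons]
        rw [hk1, PySem.List.pyGetD_natCast, List.getD_eq_getElem row false hk1x,
            List.getElem_take]
        have : decide (((k + 1 : ℕ) : Int) < (w : Int)) = true := by
          simp; exact_mod_cast hkw1
        rw [this, Bool.true_and]
      · rw [List.drop_eq_nil_of_le (by simp [Nat.min_eq_left hw]; omega), List.headD_nil]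
        have : decide ((k : Int) + 1 < (w : Int)) = false := by
          simp; exact_mod_cast Nat.not_lt.mp hkw1
        rw [this, Bool.false_and]
    rw [hk1, ih (k + 1) (by omega) (by omega)]
    show _ = pvEnds ((row.take w)[k] :: (row.take w).drop (k + 1)) (k : Int)
    rw [pvEnds]
    have hnext2 : (decide (((k + 1 : ℕ) : Int) < (w : Int))
          && PySem.List.pyGetD row (((k + 1 : ℕ) : Int)) false)
        = ((row.take w).drop (k + 1)).headD false := by rw [← hk1]; exact hnext
    simp only [hget, hnext2]
    rw [hk1]
    by_cases hc : ((row.take w)[k] && !((row.take w).drop (k + 1)).headD false) = true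
    · rw [if_pos hc, if_pos hc, List.singleton_append]
    · rw [if_neg hc, if_neg hc, List.nil_append]

-- per-row agreement: A's scan equals B's starts/ends zip, both are the run rectangles
theorem pvRow (y : Int) (w : ℕ) (row : List Bool) (hw : w ≤ row.length)
    (rects : List (Int × Int × Int × Int)) :
    pvFlushA y (w : Int)
        ((PySem.List.pyRange 0 (w : Int) 1).foldl
          (fun st x => pvStepA y st x (PySem.List.pyGetD row x false)) (rects, none))
      = (((PySem.List.pyRange 0 (w : Int) 1).filter
            (fun x => PySem.List.pyGetD row x false
              && !(decide (x > 0) && PySem.List.pyGetD row (x - 1) false))).zip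
          ((PySem.List.pyRange 0 (w : Int) 1).filter
            (fun x => PySem.List.pyGetD row x false
              && !(decide (x + 1 < (w : Int)) && PySem.List.pyGetD row (x + 1) false)))).foldl
          (fun rects p => rects ++ [(p.1, y, p.2 - p.1 + 1, 1)]) rects := by
  have hA := pvBridge row false (pvStepA y) w hw w 0 (rects, none) (Nat.zero_le _) rfl
  simp only [Nat.cast_zero, List.drop_zero] at hA
  have hS := pvStartsBridge row w hw w 0 (Nat.zero_le _) rfl
  have hE := pvEndsBridge row w hw w 0 (Nat.zero_le _) rfl
  simp only [Nat.cast_zero, List.drop_zero] at hS hE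
  have hprev0 : (decide ((0 : Int) > 0) && PySem.List.pyGetD row ((0 : Int) - 1) false)
      = false := by simp
  rw [hprev0] at hS
  rw [hA, hS, hE, pvFoldAppend, pvZipRuns]
  have hlen : ((w : Int)) = 0 + (((row.take w).length : ℕ) : Int) := by
    simp [Nat.min_eq_left hw]
  rw [hlen, (pvMainA y (row.take w) 0 rects).1]

theorem pvIdxFold_congr {α σ : Type} (g1 g2 : σ → Int → α → σ) :
    ∀ (es : List α) (x : Int) (st : σ),
      (∀ (st : σ) (x : Int) (a : α), a ∈ es → g1 st x a = g2 st x a) →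
      pvIdxFold g1 es x st = pvIdxFold g2 es x st := by
  intro es
  induction es with
  | nil => intro x st _; rfl
  | cons a t ih =>
    intro x st h
    rw [pvIdxFold_cons, pvIdxFold_cons, h st x a (List.mem_cons_self)]
    exact ih _ _ (fun st x a ha => h st x a (List.mem_cons_of_mem _ ha))

-- ===== VERDICT (by name: the statement is the Claim_ definition above) =====
theorem edges_to_rectangles_py_spec : Claim_equal_edges_to_rectangles_py := by
  intro edges _ hpre
  unfold Spec_edges_to_rectangles_py
  cases edges with
  | nil => decide
  | cons r rs =>
    unfold edges_to_rectangles_py edges_to_rectangles_py_alt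
    have hne : (r :: rs).length ≠ 0 := by simp
    rw [if_pos hne]
    simp only [PySem.List.pyGetD_zero_cons]
    congr 1
    have hA := pvBridge (r :: rs) []
      (fun rects i row => pvFlushA i ((r.length : ℕ) : Int)
        ((PySem.List.pyRange 0 ((r.length : ℕ) : Int) 1).foldl
          (fun st x => pvStepA i st x (PySem.List.pyGetD row x false)) (rects, none)))
      ((r :: rs).length) le_rfl ((r :: rs).length) 0 [] (Nat.zero_le _) rfl
    have hB := pvBridge (r :: rs) []
      (fun (rects : List (Int × Int × Int × Int)) (i : Int) (row : List Bool) =>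
        (((PySem.List.pyRange 0 ((r.length : ℕ) : Int) 1).filter
            (fun x => PySem.List.pyGetD row x false
              && !(decide (x > 0) && PySem.List.pyGetD row (x - 1) false))).zip
          ((PySem.List.pyRange 0 ((r.length : ℕ) : Int) 1).filter
            (fun x => PySem.List.pyGetD row x false
              && !(decide (x + 1 < ((r.length : ℕ) : Int)) && PySem.List.pyGetD row (x + 1) false)))).foldl
          (fun rects p => rects ++ [(p.1, i, p.2 - p.1 + 1, (1 : Int))]) rects)
      ((r :: rs).length) le_rfl ((r :: rs).length) 0 [] (Nat.zero_le _) rfl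
    simp only [Nat.cast_zero, List.drop_zero, List.take_length] at hA hB
    rw [hA]
    refine Eq.trans ?_ hB.symm
    apply pvIdxFold_congr
    intro st y row hmem
    exact pvRow y r.length row (hpre row hmem) st
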